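-- pv_equiv track=rewrite | github.com/denoseu/Tucil1_13522013 | src/tes.py | all_sequences
-- ===== SOURCE A (Python) =====
-- def all_sequences(matrix, buffer_size):
--     sequences = []
--     coordinates = []
--
--     def is_valid_move(row, col):
--         return 0 <= row < len(matrix) and 0 <= col < len(matrix[0]) and (row, col) not in visited
--
--     def explore(row, col, buffer_index, is_vertical):
--         visited.add((row, col))
--         current_token.append(matrix[row][col])
--         current_coordinate.append((col + 1, row + 1))
--         if buffer_index == buffer_size - 1:
--             coordinates.append(current_coordinate[:])
--             sequences.append(current_token[:])
--         else:
--             directions = [(1, 0), (-1, 0)] if is_vertical else [(0, 1), (0, -1)]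
--             for dr, dc in directions:
--                 new_row, new_col = row, col
--                 for _ in range(buffer_size - buffer_index):
--                     new_row, new_col = new_row + dr, new_col + dc
--                     if is_valid_move(new_row, new_col):
--                         explore(new_row, new_col, buffer_index + 1, not is_vertical)
--
--         visited.remove((row, col))
--         current_token.pop()
--         current_coordinate.pop()
--
--     current_coordinate = []
--     current_token = []
--     visited = set()
--     for col_index in range(len(matrix[0])):
--         explore(0, col_index, 0, True)
--     return sequences, coordinates
-- ===== SOURCE B (Python) =====
-- def all_sequences(matrix, buffer_size):
--     # Iterative DFS over an explicit LIFO stack of frames instead of recursion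
--     # with a shared mutable visited set; each frame carries its own path.
--     width = len(matrix[0])
--
--     def children(row, col, bi, vert, tokens, coords):
--         dirs = ((1, 0), (-1, 0)) if vert else ((0, 1), (0, -1))
--         return [(row + dr * k, col + dc * k, bi + 1, not vert,
--                  tokens + [matrix[row + dr * k][col + dc * k]],
--                  coords + [(col + dc * k + 1, row + dr * k + 1)])
--                 for dr, dc in dirs
--                 for k in range(1, buffer_size - bi + 1)
--                 if 0 <= row + dr * k < len(matrix)
--                 and 0 <= col + dc * k < width
--                 and (col + dc * k + 1, row + dr * k + 1) not in coords]
--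
--     sequences = []
--     coordinates = []
--     stack = [(0, c, 0, True, [matrix[0][c]], [(c + 1, 1)])
--              for c in reversed(range(width))]
--     while stack:
--         row, col, bi, vert, tokens, coords = stack.pop()
--         if bi == buffer_size - 1:
--             sequences.append(tokens)
--             coordinates.append(coords)
--         else:
--             stack.extend(reversed(children(row, col, bi, vert, tokens, coords)))
--     return sequences, coordinates
-- ===== Notes on version B (the rewrite author's own statement) =====
-- stated objective: alternative
-- what changed: Replaces A's recursive backtracking over a shared mutable visited set and shared token/coordinate lists (mutated and restored around each call) by an iterative DFS over an explicit LIFO stack of self-contained frames, children generated by a comprehension with absolute offsets dr*k and pushed in reverse to preserve A's output order.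
import Mathlib
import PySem

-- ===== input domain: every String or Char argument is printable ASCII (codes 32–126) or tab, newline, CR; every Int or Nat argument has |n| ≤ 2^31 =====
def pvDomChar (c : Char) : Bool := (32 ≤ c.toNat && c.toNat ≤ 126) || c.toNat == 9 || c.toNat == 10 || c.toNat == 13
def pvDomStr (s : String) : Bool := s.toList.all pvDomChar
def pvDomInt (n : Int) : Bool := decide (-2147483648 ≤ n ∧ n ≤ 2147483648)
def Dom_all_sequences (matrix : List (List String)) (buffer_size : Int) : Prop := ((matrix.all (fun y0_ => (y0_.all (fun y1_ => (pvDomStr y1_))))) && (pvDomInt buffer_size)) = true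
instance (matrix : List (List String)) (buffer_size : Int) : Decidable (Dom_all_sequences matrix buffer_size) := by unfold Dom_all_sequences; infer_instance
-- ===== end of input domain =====

-- B replaces A's recursive backtracking (shared mutable visited set + shared token/coordinate
-- lists restored after each call) by an iterative DFS over an explicit LIFO stack of
-- self-contained frames; same asymptotic cost (objective: alternative).

-- ===== PORT A =====

-- matrix[row][col]; exact whenever 0 ≤ row < len(matrix) and 0 ≤ col < len(matrix[row])
-- (guaranteed by is_valid_move under Pre_); total via defaults.
def pvCellA (m : List (List String)) (r c : Int) : String :=
  (PySem.List.pyGet? ((PySem.List.pyGet? m r).getD []) c).getD ""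

abbrev PVAState := PySem.Set (Int × Int) × List String × List (Int × Int) ×
  List (List String) × List (List (Int × Int))

-- is_valid_move; 'len(matrix[0])' is (m.headD []).length — exact since m ≠ [] under Pre_.
def pvIsValidA (m : List (List String)) (v : PySem.Set (Int × Int)) (r c : Int) : Bool :=
  decide (0 ≤ r) && decide (r < (m.length : Int)) && decide (0 ≤ c) &&
    decide (c < ((m.headD []).length : Int)) && !(PySem.Set.contains v (r, c))

-- explore / the 'for dr, dc in directions' loop / the 'for _ in range(...)' loop, as a
-- mutual recursion threading the whole mutable state (visited, token, coordinate,
-- sequences, coordinates).  'fuel' only makes the recursion structural: the call depth of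
-- explore is at most buffer_size (buffer_index grows by 1 per call and recursion needs
-- buffer_index < buffer_size - 1), so the fuel buffer_size.toNat + 1 given below is never
-- exhausted.
def pvStepsA (m : List (List String))
    (expl : Int → Int → Int → Bool → PVAState → PVAState) (dr dc : Int) :
    Nat → Int → Int → Int → Bool → PVAState → PVAState
  | 0, _, _, _, _, st => st
  | n'+1, nr, nc, bi, iv, st =>
    let nr' := nr + dr
    let nc' := nc + dc
    let st' := if pvIsValidA m st.1 nr' nc'
               then expl nr' nc' (bi + 1) (!iv) st
               else st
    pvStepsA m expl dr dc n' nr' nc' bi iv st'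

def pvDirsA (m : List (List String)) (bs : Int)
    (expl : Int → Int → Int → Bool → PVAState → PVAState) :
    List (Int × Int) → Int → Int → Int → Bool → PVAState → PVAState
  | [], _, _, _, _, st => st
  | d :: ds', row, col, bi, iv, st =>
    pvDirsA m bs expl ds' row col bi iv
      (pvStepsA m expl d.1 d.2 (bs - bi).toNat row col bi iv st)

def pvExploreA (m : List (List String)) (bs : Int) :
    Nat → Int → Int → Int → Bool → PVAState → PVAState
  | 0, _, _, _, _, st => st
  | fuel'+1, row, col, bi, iv, st =>
    let v := PySem.Set.add st.1 (row, col)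
    let t := st.2.1 ++ [pvCellA m row col]
    let c := st.2.2.1 ++ [(col + 1, row + 1)]
    let st1 : PVAState :=
      if bi = bs - 1 then (v, t, c, st.2.2.2.1 ++ [t], st.2.2.2.2 ++ [c])
      else pvDirsA m bs (pvExploreA m bs fuel')
             (if iv then [(1, 0), (-1, 0)] else [(0, 1), (0, -1)])
             row col bi iv (v, t, c, st.2.2.2.1, st.2.2.2.2)
    -- visited.remove / token.pop / coordinate.pop: the removed element / popped last entry
    -- is always the one appended above, so discard/dropLast are exact here.
    (PySem.Set.discard st1.1 (row, col), st1.2.1.dropLast, st1.2.2.1.dropLast,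
      st1.2.2.2.1, st1.2.2.2.2)

def all_sequences (matrix : List (List String)) (buffer_size : Int) :
    List (List String) × (List (List (Int × Int))) :=
  -- len(matrix[0]): Python raises on matrix = [] (excluded by Pre_)
  let w : Int := ((matrix.headD []).length : Int)
  let st := (PySem.List.pyRange 0 w 1).foldl
    (fun st ci => pvExploreA matrix buffer_size (buffer_size.toNat + 1) 0 ci 0 true st)
    (PySem.Set.ofList [], [], [], [], [])
  (st.2.2.2.1, st.2.2.2.2)

-- ===== PORT B =====

-- matrix[row][col] on B's side, same exactness remark as pvCellA
def pvCellB (m : List (List String)) (r c : Int) : String :=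
  match PySem.List.pyGet? m r with
  | none => ""
  | some row => (PySem.List.pyGet? row c).getD ""

-- a frame: (row, col, buffer_index, is_vertical, token path, coordinate path)
abbrev PVBFrame := Int × Int × Int × Bool × List String × List (Int × Int)

-- the children(...) comprehension of Source B
def pvChildrenB (m : List (List String)) (w bs : Int) (f : PVBFrame) : List PVBFrame :=
  ((if f.2.2.2.1 then [((1 : Int), (0 : Int)), (-1, 0)] else [(0, 1), (0, -1)]) :
      List (Int × Int)).flatMap fun d =>
    (PySem.List.pyRange 1 (bs - f.2.2.1 + 1) 1).filterMap fun k =>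
      if 0 ≤ f.1 + d.1 * k ∧ f.1 + d.1 * k < (m.length : Int) ∧ 0 ≤ f.2.1 + d.2 * k ∧
          f.2.1 + d.2 * k < w ∧ (f.2.1 + d.2 * k + 1, f.1 + d.1 * k + 1) ∉ f.2.2.2.2.2 then
        some (f.1 + d.1 * k, f.2.1 + d.2 * k, f.2.2.1 + 1, !f.2.2.2.1,
          f.2.2.2.2.1 ++ [pvCellB m (f.1 + d.1 * k) (f.2.1 + d.2 * k)],
          f.2.2.2.2.2 ++ [(f.2.1 + d.2 * k + 1, f.1 + d.1 * k + 1)])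
      else none

-- termination machinery for the stack loop (cited by pvRunB's decreasing_by)
def pvWeight : Nat → Nat
  | 0 => 1
  | r + 1 => 1 + 2 * (r + 1) * pvWeight r

def pvMeasureB (bs : Int) (stack : List PVBFrame) : Nat :=
  (stack.map (fun f => pvWeight (bs - f.2.2.1).toNat)).sum

-- the 'while stack:' loop of Source B; list head = top of stack, so Python's
-- 'stack.extend(reversed(children))' is prepending the children in order.  'fuel' only
-- makes the loop structural: each iteration strictly decreases pvMeasureB of the stack
-- (a standard weight argument, pvMeasureB_childrenB_lt below), so the initial fuel
-- pvMeasureB bs seed given below is never exhausted.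
def pvRunB (m : List (List String)) (w bs : Int) :
    Nat → List PVBFrame → List (List String) × List (List (Int × Int)) →
    List (List String) × List (List (Int × Int))
  | 0, _, acc => acc
  | _+1, [], acc => acc
  | fuel+1, f :: rest, acc =>
    if f.2.2.1 = bs - 1 then
      pvRunB m w bs fuel rest (acc.1 ++ [f.2.2.2.2.1], acc.2 ++ [f.2.2.2.2.2])
    else
      pvRunB m w bs fuel (pvChildrenB m w bs f ++ rest) acc

def all_sequences_alt (matrix : List (List String)) (buffer_size : Int) :
    List (List String) × (List (List (Int × Int))) :=
  -- width = len(matrix[0]); Python raises on matrix = [] (excluded by Pre_)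
  let w : Int := ((matrix.headD []).length : Int)
  -- the seed stack, first column on top (Python builds it over reversed(range(width)))
  let seed : List PVBFrame := (PySem.List.pyRange 0 w 1).map
    (fun ci => ((0 : Int), ci, (0 : Int), true, [pvCellB matrix 0 ci], [(ci + 1, (1 : Int))]))
  pvRunB matrix w buffer_size (pvMeasureB buffer_size seed) seed ([], [])

-- ===== PRECONDITION & SPEC =====

-- Pre_ excludes matrix = [] (len(matrix[0]) raises IndexError) and, when buffer_size ≥ 2
-- (movement between rows is possible), ragged matrices whose rows are shorter than row 0,
-- on which A's matrix[row][col] can raise IndexError; this also excludes some ragged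
-- matrices whose short rows happen to be unreachable, on which A returns (see cites).
def Pre_all_sequences (matrix : List (List String)) (buffer_size : Int) : Prop :=
  matrix ≠ [] ∧ (2 ≤ buffer_size → ∀ row ∈ matrix, (matrix.headD []).length ≤ row.length)
instance (matrix : List (List String)) (buffer_size : Int) :
    Decidable (Pre_all_sequences matrix buffer_size) := by
  unfold Pre_all_sequences; infer_instance

def pvWitness_all_sequences : List (List String) × Int := ([["a", "b"], ["c", "d"]], 2)

def Spec_all_sequences (matrix : List (List String)) (buffer_size : Int) (out : List (List String) × (List (List (Int × Int)))) : Prop := out = all_sequences_alt matrix buffer_size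
instance (matrix : List (List String)) (buffer_size : Int) (out : List (List String) × (List (List (Int × Int)))) : Decidable (Spec_all_sequences matrix buffer_size out) := by unfold Spec_all_sequences; infer_instance

-- ===== CLAIM (what is proved, stated in full; the proofs are below) =====
def Claim_equal_all_sequences : Prop := ∀ (matrix : List (List String)) (buffer_size : Int), Dom_all_sequences matrix buffer_size → Pre_all_sequences matrix buffer_size → Spec_all_sequences matrix buffer_size (all_sequences matrix buffer_size)

-- ===== LEMMAS AND PROOFS =====

theorem pvWeight_pos (r : Nat) : 0 < pvWeight r := by
  cases r <;> simp [pvWeight]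

theorem pvChildrenB_eq_nil (m : List (List String)) (w bs : Int) (f : PVBFrame)
    (h : bs - f.2.2.1 ≤ 0) : pvChildrenB m w bs f = [] := by
  have : PySem.List.pyRange 1 (bs - f.2.2.1 + 1) 1 = [] :=
    PySem.List.pyRange_one_eq_nil (by omega)
  simp [pvChildrenB, this]

theorem pvChildrenB_bi (m : List (List String)) (w bs : Int) (f g : PVBFrame)
    (hg : g ∈ pvChildrenB m w bs f) : g.2.2.1 = f.2.2.1 + 1 := by
  simp only [pvChildrenB, List.mem_flatMap, List.mem_filterMap] at hg
  obtain ⟨d, _, k, _, hk⟩ := hg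
  split at hk
  · cases hk; rfl
  · cases hk

theorem pvLen_flatMap_two {α β : Type} (d1 d2 : α) (g : α → Int → Option β) (a b : Int) :
    (([d1, d2] : List α).flatMap (fun d => (PySem.List.pyRange a b 1).filterMap (g d))).length ≤
      2 * (b - a).toNat := by
  simp only [List.flatMap_cons, List.flatMap_nil, List.length_append, List.length_nil]
  have h1 := List.length_filterMap_le (g d1) (PySem.List.pyRange a b 1)
  have h2 := List.length_filterMap_le (g d2) (PySem.List.pyRange a b 1)
  rw [PySem.List.length_pyRange_one] at h1 h2
  omega

theorem pvChildrenB_length_le (m : List (List String)) (w bs : Int) (f : PVBFrame) :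
    (pvChildrenB m w bs f).length ≤ 2 * (bs - f.2.2.1).toNat := by
  have he : bs - f.2.2.1 + 1 - 1 = bs - f.2.2.1 := by ring
  unfold pvChildrenB
  split
  · have := pvLen_flatMap_two ((1 : Int), (0 : Int)) (-1, 0)
      (fun d k =>
        if 0 ≤ f.1 + d.1 * k ∧ f.1 + d.1 * k < (m.length : Int) ∧ 0 ≤ f.2.1 + d.2 * k ∧
            f.2.1 + d.2 * k < w ∧ (f.2.1 + d.2 * k + 1, f.1 + d.1 * k + 1) ∉ f.2.2.2.2.2 then
          some ((f.1 + d.1 * k, f.2.1 + d.2 * k, f.2.2.1 + 1, !f.2.2.2.1,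
            f.2.2.2.2.1 ++ [pvCellB m (f.1 + d.1 * k) (f.2.1 + d.2 * k)],
            f.2.2.2.2.2 ++ [(f.2.1 + d.2 * k + 1, f.1 + d.1 * k + 1)]) : PVBFrame)
        else none) 1 (bs - f.2.2.1 + 1)
    rw [he] at this
    exact this
  · have := pvLen_flatMap_two ((0 : Int), (1 : Int)) (0, -1)
      (fun d k =>
        if 0 ≤ f.1 + d.1 * k ∧ f.1 + d.1 * k < (m.length : Int) ∧ 0 ≤ f.2.1 + d.2 * k ∧
            f.2.1 + d.2 * k < w ∧ (f.2.1 + d.2 * k + 1, f.1 + d.1 * k + 1) ∉ f.2.2.2.2.2 then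
          some ((f.1 + d.1 * k, f.2.1 + d.2 * k, f.2.2.1 + 1, !f.2.2.2.1,
            f.2.2.2.2.1 ++ [pvCellB m (f.1 + d.1 * k) (f.2.1 + d.2 * k)],
            f.2.2.2.2.2 ++ [(f.2.1 + d.2 * k + 1, f.1 + d.1 * k + 1)]) : PVBFrame)
        else none) 1 (bs - f.2.2.1 + 1)
    rw [he] at this
    exact this

theorem pvSum_map_const {α : Type} {l : List α} {g : α → Nat} {c : Nat}
    (h : ∀ x ∈ l, g x = c) : (l.map g).sum = l.length * c := by
  induction l with
  | nil => simp
  | cons x xs ih =>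
    simp only [List.map_cons, List.sum_cons, List.length_cons]
    rw [h x (by simp), ih (fun y hy => h y (by simp [hy]))]
    ring

theorem pvMeasureB_childrenB_lt (m : List (List String)) (w bs : Int) (f : PVBFrame) :
    pvMeasureB bs (pvChildrenB m w bs f) < pvWeight (bs - f.2.2.1).toNat := by
  rcases hr : (bs - f.2.2.1).toNat with _ | s
  · rw [pvChildrenB_eq_nil m w bs f (by omega)]
    simp [pvMeasureB, pvWeight]
  · have hchild : ∀ g ∈ pvChildrenB m w bs f, pvWeight (bs - g.2.2.1).toNat = pvWeight s := by
      intro g hg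
      rw [pvChildrenB_bi m w bs f g hg]
      congr 1
      omega
    unfold pvMeasureB
    rw [pvSum_map_const hchild]
    have hlen := pvChildrenB_length_le m w bs f
    rw [hr] at hlen
    have hpos := pvWeight_pos s
    have : (pvChildrenB m w bs f).length * pvWeight s ≤ (2 * (s + 1)) * pvWeight s :=
      Nat.mul_le_mul_right _ hlen
    calc (pvChildrenB m w bs f).length * pvWeight s ≤ 2 * (s + 1) * pvWeight s := this
      _ < 1 + 2 * (s + 1) * pvWeight s := by omega
      _ = pvWeight (s + 1) := rfl


-- pair of result accumulators, appended componentwise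
def pvCombine (p a : List (List String) × List (List (Int × Int))) :
    List (List String) × List (List (Int × Int)) := (p.1 ++ a.1, p.2 ++ a.2)

theorem pvWeight_lt_succ (r : Nat) : pvWeight r < pvWeight (r + 1) := by
  have h1 := pvWeight_pos r
  have h2 : pvWeight r ≤ 2 * (r + 1) * pvWeight r := Nat.le_mul_of_pos_left _ (by omega)
  calc pvWeight r < 1 + pvWeight r := by omega
    _ ≤ 1 + 2 * (r + 1) * pvWeight r := by omega
    _ = pvWeight (r + 1) := rfl

-- the (sequences, coordinates) contribution of the DFS rooted at one frame
def pvResB (m : List (List String)) (w bs : Int) (f : PVBFrame) :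
    List (List String) × List (List (Int × Int)) :=
  if f.2.2.1 = bs - 1 then ([f.2.2.2.2.1], [f.2.2.2.2.2])
  else ((pvChildrenB m w bs f).attach.map (fun c => pvResB m w bs c.1)).foldr pvCombine ([], [])
termination_by pvWeight (bs - f.2.2.1).toNat
decreasing_by
  have hbi := pvChildrenB_bi m w bs f c.1 c.2
  have hpos : 0 < bs - f.2.2.1 := by
    by_contra hneg
    have := pvChildrenB_eq_nil m w bs f (by omega)
    rw [this] at c
    exact absurd c.2 (List.not_mem_nil)
  have h1 : (bs - c.1.2.2.1).toNat + 1 = (bs - f.2.2.1).toNat := by rw [hbi]; omega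
  rw [← h1]
  exact pvWeight_lt_succ _

def pvResList (m : List (List String)) (w bs : Int) (l : List PVBFrame) :
    List (List String) × List (List (Int × Int)) :=
  (l.map (pvResB m w bs)).foldr pvCombine ([], [])

theorem pvCombine_nil_left (a : List (List String) × List (List (Int × Int))) :
    pvCombine ([], []) a = a := by simp [pvCombine]

theorem pvCombine_assoc (a b c : List (List String) × List (List (Int × Int))) :
    pvCombine (pvCombine a b) c = pvCombine a (pvCombine b c) := by
  simp [pvCombine]

theorem pvResList_nil (m : List (List String)) (w bs : Int) :
    pvResList m w bs [] = ([], []) := rfl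

theorem pvResList_cons (m : List (List String)) (w bs : Int) (f : PVBFrame)
    (l : List PVBFrame) :
    pvResList m w bs (f :: l) = pvCombine (pvResB m w bs f) (pvResList m w bs l) := rfl

theorem pvResList_append (m : List (List String)) (w bs : Int) (l1 l2 : List PVBFrame) :
    pvResList m w bs (l1 ++ l2) = pvCombine (pvResList m w bs l1) (pvResList m w bs l2) := by
  induction l1 with
  | nil => simp [pvResList_nil, pvCombine_nil_left]
  | cons f l ih =>
    simp only [List.cons_append, pvResList_cons, ih, pvCombine_assoc]

theorem pvResB_not_leaf (m : List (List String)) (w bs : Int) (f : PVBFrame)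
    (h : f.2.2.1 ≠ bs - 1) :
    pvResB m w bs f = pvResList m w bs (pvChildrenB m w bs f) := by
  rw [pvResB, if_neg h, pvResList]
  congr 1
  rw [List.map_attach_eq_pmap, List.pmap_eq_map]

theorem pvRunB_eq (m : List (List String)) (w bs : Int) :
    ∀ (fuel : Nat) (stack : List PVBFrame), pvMeasureB bs stack ≤ fuel →
    ∀ acc, pvRunB m w bs fuel stack acc = pvCombine acc (pvResList m w bs stack) := by
  intro fuel
  induction fuel with
  | zero =>
    intro stack h acc
    cases stack with
    | nil => simp [pvRunB, pvResList_nil, pvCombine]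
    | cons f rest =>
      exfalso
      have := pvWeight_pos (bs - f.2.2.1).toNat
      simp only [pvMeasureB, List.map_cons, List.sum_cons] at h
      omega
  | succ fuel ih =>
    intro stack h acc
    cases stack with
    | nil => simp [pvRunB, pvResList_nil, pvCombine]
    | cons f rest =>
      rw [pvRunB]
      have hwpos := pvWeight_pos (bs - f.2.2.1).toNat
      simp only [pvMeasureB, List.map_cons, List.sum_cons] at h
      split
      · rename_i hleaf
        rw [ih rest (by simp only [pvMeasureB]; omega)]
        rw [pvResList_cons, pvResB, if_pos hleaf, ← pvCombine_assoc]
        rfl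
      · rename_i hnl
        have hlt := pvMeasureB_childrenB_lt m w bs f
        rw [ih (pvChildrenB m w bs f ++ rest)
            (by simp only [pvMeasureB, List.map_append, List.sum_append] at *; omega)]
        rw [pvResList_append, pvResList_cons, pvResB_not_leaf m w bs f hnl]

-- the visited set of A is exactly the cell set of the coordinate path of B's frame
def pvInv (v : PySem.Set (Int × Int)) (c : List (Int × Int)) : Prop :=
  ∀ p : Int × Int, p ∈ v ↔ (p.2 + 1, p.1 + 1) ∈ c

theorem pvInv_extend (v : PySem.Set (Int × Int)) (c : List (Int × Int)) (row col : Int)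
    (h : pvInv v c) : pvInv (v ++ [(row, col)]) (c ++ [(col + 1, row + 1)]) := by
  intro p
  simp only [List.mem_append, List.mem_singleton, h p]
  constructor
  · rintro (hp | rfl)
    · exact Or.inl hp
    · exact Or.inr rfl
  · rintro (hp | hp)
    · exact Or.inl hp
    · right
      rw [Prod.ext_iff] at hp
      obtain ⟨h1, h2⟩ := hp
      simp only at h1 h2
      have hr : p.1 = row := by omega
      have hc : p.2 = col := by omega
      calc p = (p.1, p.2) := rfl
        _ = (row, col) := by rw [hr, hc]

-- the candidate frames for one direction, the remaining cnt steps, positions written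
-- relative to (r0 + dr*j, c0 + dc*j)
def pvSF (m : List (List String)) (w bs : Int) (dr dc bi : Int) (iv : Bool)
    (t1 : List String) (c1 : List (Int × Int)) (r0 c0 : Int) (j : Int) (cnt : Nat) :
    List PVBFrame :=
  (PySem.List.pyRange (j + 1) (j + 1 + cnt) 1).filterMap fun k =>
    if 0 ≤ r0 + dr * k ∧ r0 + dr * k < (m.length : Int) ∧ 0 ≤ c0 + dc * k ∧
        c0 + dc * k < w ∧ (c0 + dc * k + 1, r0 + dr * k + 1) ∉ c1 then
      some (r0 + dr * k, c0 + dc * k, bi + 1, !iv,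
        t1 ++ [pvCellB m (r0 + dr * k) (c0 + dc * k)],
        c1 ++ [(c0 + dc * k + 1, r0 + dr * k + 1)])
    else none

theorem pvSF_zero (m : List (List String)) (w bs : Int) (dr dc bi : Int) (iv : Bool)
    (t1 : List String) (c1 : List (Int × Int)) (r0 c0 j : Int) :
    pvSF m w bs dr dc bi iv t1 c1 r0 c0 j 0 = [] := by
  unfold pvSF
  rw [PySem.List.pyRange_one_eq_nil (by omega)]
  rfl

theorem pvSF_succ (m : List (List String)) (w bs : Int) (dr dc bi : Int) (iv : Bool)
    (t1 : List String) (c1 : List (Int × Int)) (r0 c0 j : Int) (cnt : Nat) :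
    pvSF m w bs dr dc bi iv t1 c1 r0 c0 j (cnt + 1) =
      (if 0 ≤ r0 + dr * (j + 1) ∧ r0 + dr * (j + 1) < (m.length : Int) ∧
          0 ≤ c0 + dc * (j + 1) ∧ c0 + dc * (j + 1) < w ∧
          (c0 + dc * (j + 1) + 1, r0 + dr * (j + 1) + 1) ∉ c1 then
        [((r0 + dr * (j + 1), c0 + dc * (j + 1), bi + 1, !iv,
          t1 ++ [pvCellB m (r0 + dr * (j + 1)) (c0 + dc * (j + 1))],
          c1 ++ [(c0 + dc * (j + 1) + 1, r0 + dr * (j + 1) + 1)]) : PVBFrame)]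
      else []) ++ pvSF m w bs dr dc bi iv t1 c1 r0 c0 (j + 1) cnt := by
  unfold pvSF
  have he : j + 1 + ((cnt : Nat) + 1 : Nat) = (j + 1) + 1 + (cnt : Nat) := by push_cast; ring
  rw [PySem.List.pyRange_one_cons (by push_cast; omega : j + 1 < j + 1 + ((cnt : Nat) + 1 : Nat))]
  rw [he]
  by_cases hC : 0 ≤ r0 + dr * (j + 1) ∧ r0 + dr * (j + 1) < (m.length : Int) ∧
      0 ≤ c0 + dc * (j + 1) ∧ c0 + dc * (j + 1) < w ∧
      (c0 + dc * (j + 1) + 1, r0 + dr * (j + 1) + 1) ∉ c1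
  · rw [List.filterMap_cons_some (h := by rw [if_pos hC]), if_pos hC]
    rfl
  · rw [List.filterMap_cons_none (h := by rw [if_neg hC]), if_neg hC]
    rfl

theorem pvDiscard_append (v : PySem.Set (Int × Int)) (x : Int × Int) (h : x ∉ v) :
    PySem.Set.discard (v ++ [x]) x = v := by
  simp only [PySem.Set.discard, List.filter_append, List.filter_cons, beq_self_eq_true,
    Bool.not_true, Bool.false_eq_true, reduceIte, List.filter_nil, List.append_nil]
  rw [List.filter_eq_self]
  intro y hy
  simp only [Bool.not_eq_eq_eq_not, Bool.not_true, beq_eq_false_iff_ne, ne_eq]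
  intro hyx
  exact h (hyx ▸ hy)

theorem pvCellA_eq_pvCellB : pvCellA = pvCellB := by
  funext m r c
  unfold pvCellA pvCellB
  cases h : PySem.List.pyGet? m r with
  | none => simp [h, PySem.List.pyGet?]
  | some row => simp [h]

theorem pvValid_iff (m : List (List String)) (w : Int)
    (hw : w = ((m.headD []).length : Int)) (v1 : PySem.Set (Int × Int))
    (c1 : List (Int × Int)) (hInv : pvInv v1 c1) (r c : Int) :
    pvIsValidA m v1 r c = true ↔
      (0 ≤ r ∧ r < (m.length : Int) ∧ 0 ≤ c ∧ c < w ∧ (c + 1, r + 1) ∉ c1) := by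
  unfold pvIsValidA
  rw [hw]
  have hmem : ((r, c) ∈ v1) ↔ ((c + 1, r + 1) ∈ c1) := hInv (r, c)
  simp only [Bool.and_eq_true, decide_eq_true_eq, Bool.not_eq_true',
    ← Bool.not_eq_true, PySem.Set.contains_iff]
  constructor
  · rintro ⟨⟨⟨⟨h1, h2⟩, h3⟩, h4⟩, h5⟩
    exact ⟨h1, h2, h3, h4, fun hc => h5 (hmem.mpr hc)⟩
  · rintro ⟨h1, h2, h3, h4, h5⟩
    exact ⟨⟨⟨⟨h1, h2⟩, h3⟩, h4⟩, fun hv => h5 (hmem.mp hv)⟩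

theorem pvStepsA_eq (m : List (List String)) (bs w : Int)
    (hw : w = ((m.headD []).length : Int))
    (expl : Int → Int → Int → Bool → PVAState → PVAState) (dr dc bi : Int) (iv : Bool)
    (v1 : PySem.Set (Int × Int)) (t1 : List String) (c1 : List (Int × Int))
    (hInv : pvInv v1 c1)
    (Hrec : ∀ (nr nc : Int) (s : List (List String)) (q : List (List (Int × Int))),
      pvIsValidA m v1 nr nc = true →
      expl nr nc (bi + 1) (!iv) (v1, t1, c1, s, q) =
        (v1, t1, c1,
         s ++ (pvResB m w bs (nr, nc, bi + 1, !iv, t1 ++ [pvCellB m nr nc],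
                c1 ++ [(nc + 1, nr + 1)])).1,
         q ++ (pvResB m w bs (nr, nc, bi + 1, !iv, t1 ++ [pvCellB m nr nc],
                c1 ++ [(nc + 1, nr + 1)])).2)) :
    ∀ (cnt : Nat) (j r0 c0 : Int) (s : List (List String)) (q : List (List (Int × Int))),
      pvStepsA m expl dr dc cnt (r0 + dr * j) (c0 + dc * j) bi iv (v1, t1, c1, s, q) =
        (v1, t1, c1,
         s ++ (pvResList m w bs (pvSF m w bs dr dc bi iv t1 c1 r0 c0 j cnt)).1,
         q ++ (pvResList m w bs (pvSF m w bs dr dc bi iv t1 c1 r0 c0 j cnt)).2) := by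
  intro cnt
  induction cnt with
  | zero =>
    intro j r0 c0 s q
    rw [pvStepsA, pvSF_zero]
    simp [pvResList_nil]
  | succ cnt ih =>
    intro j r0 c0 s q
    rw [pvStepsA]
    simp only []
    have hr : r0 + dr * j + dr = r0 + dr * (j + 1) := by ring
    have hc : c0 + dc * j + dc = c0 + dc * (j + 1) := by ring
    rw [pvSF_succ]
    by_cases hC : 0 ≤ r0 + dr * (j + 1) ∧ r0 + dr * (j + 1) < (m.length : Int) ∧
        0 ≤ c0 + dc * (j + 1) ∧ c0 + dc * (j + 1) < w ∧
        (c0 + dc * (j + 1) + 1, r0 + dr * (j + 1) + 1) ∉ c1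
    · have hvalid : pvIsValidA m v1 (r0 + dr * j + dr) (c0 + dc * j + dc) = true := by
        rw [hr, hc, pvValid_iff m w hw v1 c1 hInv]
        exact hC
      rw [if_pos hvalid, hr, hc, Hrec _ _ _ _ (by rw [← hr, ← hc]; exact hvalid)]
      rw [ih (j + 1)]
      rw [if_pos hC, List.singleton_append, pvResList_cons]
      simp [pvCombine, List.append_assoc]
    · have hvalid : ¬ pvIsValidA m v1 (r0 + dr * j + dr) (c0 + dc * j + dc) = true := by
        rw [hr, hc, pvValid_iff m w hw v1 c1 hInv]
        exact hC
      rw [if_neg hvalid, hr, hc, ih (j + 1)]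
      rw [if_neg hC, List.nil_append]

theorem pvChildrenB_eq_SF (m : List (List String)) (w bs : Int) (f : PVBFrame) :
    pvChildrenB m w bs f =
      (if f.2.2.2.1 then
        pvSF m w bs 1 0 f.2.2.1 f.2.2.2.1 f.2.2.2.2.1 f.2.2.2.2.2 f.1 f.2.1 0
            (bs - f.2.2.1).toNat ++
          pvSF m w bs (-1) 0 f.2.2.1 f.2.2.2.1 f.2.2.2.2.1 f.2.2.2.2.2 f.1 f.2.1 0
            (bs - f.2.2.1).toNat
      else
        pvSF m w bs 0 1 f.2.2.1 f.2.2.2.1 f.2.2.2.2.1 f.2.2.2.2.2 f.1 f.2.1 0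
            (bs - f.2.2.1).toNat ++
          pvSF m w bs 0 (-1) f.2.2.1 f.2.2.2.1 f.2.2.2.2.1 f.2.2.2.2.2 f.1 f.2.1 0
            (bs - f.2.2.1).toNat) := by
  have hr : PySem.List.pyRange 1 (bs - f.2.2.1 + 1) 1 =
      PySem.List.pyRange (0 + 1) (0 + 1 + ((bs - f.2.2.1).toNat : Nat)) 1 := by
    by_cases hb : 0 ≤ bs - f.2.2.1
    · congr 1 <;> push_cast <;> omega
    · rw [PySem.List.pyRange_one_eq_nil (by omega),
        PySem.List.pyRange_one_eq_nil (by push_cast; omega)]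
  unfold pvChildrenB pvSF
  rw [hr]
  split <;> simp
theorem pvExploreA_eq (m : List (List String)) (bs w : Int)
    (hw : w = ((m.headD []).length : Int)) :
    ∀ (n fuel : Nat) (row col bi : Int) (iv : Bool) (v : PySem.Set (Int × Int))
      (t : List String) (c : List (Int × Int)) (s : List (List String))
      (q : List (List (Int × Int))),
      (bs - bi).toNat ≤ n → n < fuel → pvInv v c → (row, col) ∉ v →
      pvExploreA m bs fuel row col bi iv (v, t, c, s, q) =
        (v, t, c,
         s ++ (pvResB m w bs (row, col, bi, iv, t ++ [pvCellB m row col],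
                c ++ [(col + 1, row + 1)])).1,
         q ++ (pvResB m w bs (row, col, bi, iv, t ++ [pvCellB m row col],
                c ++ [(col + 1, row + 1)])).2) := by
  intro n
  induction n using Nat.strong_induction_on with
  | _ n IH =>
    intro fuel row col bi iv v t c s q hbnd hfuel hInv hnv
    obtain ⟨fuel', rfl⟩ : ∃ fuel', fuel = fuel' + 1 := ⟨fuel - 1, by omega⟩
    rw [pvExploreA]
    simp only [pvCellA_eq_pvCellB, PySem.Set.add_of_not_mem hnv]
    have hInv' : pvInv (v ++ [(row, col)]) (c ++ [(col + 1, row + 1)]) :=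
      pvInv_extend v c row col hInv
    by_cases hleaf : bi = bs - 1
    · rw [if_pos hleaf]
      rw [pvResB, if_pos (by exact hleaf)]
      simp [pvDiscard_append v (row, col) hnv]
    · rw [if_neg hleaf]
      rw [pvResB_not_leaf m w bs _ (by exact hleaf)]
      rw [pvChildrenB_eq_SF]
      by_cases hcnt : (bs - bi).toNat = 0
      · cases iv <;>
        · simp only [Bool.false_eq_true, reduceIte, if_true]
          rw [pvDirsA, pvDirsA, pvDirsA, hcnt, pvStepsA, pvStepsA]
          simp only [pvDiscard_append v (row, col) hnv, List.dropLast_concat]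
          simp [pvSF_zero, pvResList_nil]
      · -- at least one step is possible, so the recursion is reachable: build Hrec from IH
        have Hrec : ∀ (nr nc : Int) (s' : List (List String))
            (q' : List (List (Int × Int))),
            pvIsValidA m (v ++ [(row, col)]) nr nc = true →
            pvExploreA m bs fuel' nr nc (bi + 1) (!iv)
                (v ++ [(row, col)], t ++ [pvCellB m row col],
                 c ++ [(col + 1, row + 1)], s', q') =
              (v ++ [(row, col)], t ++ [pvCellB m row col], c ++ [(col + 1, row + 1)],
               s' ++ (pvResB m w bs (nr, nc, bi + 1, !iv,
                      (t ++ [pvCellB m row col]) ++ [pvCellB m nr nc],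
                      (c ++ [(col + 1, row + 1)]) ++ [(nc + 1, nr + 1)])).1,
               q' ++ (pvResB m w bs (nr, nc, bi + 1, !iv,
                      (t ++ [pvCellB m row col]) ++ [pvCellB m nr nc],
                      (c ++ [(col + 1, row + 1)]) ++ [(nc + 1, nr + 1)])).2) := by
          intro nr nc s' q' hvalid
          have hnm : (nr, nc) ∉ v ++ [(row, col)] := by
            unfold pvIsValidA at hvalid
            simp only [Bool.and_eq_true, Bool.not_eq_true'] at hvalid
            intro hmem
            rw [(PySem.Set.contains_iff (v ++ [(row, col)]) (nr, nc)).2 hmem] at hvalid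
            simp at hvalid
          exact IH (n - 1) (by omega) fuel' nr nc (bi + 1) (!iv) _ _ _ s' q'
            (by omega) (by omega) hInv' hnm
        have hs := fun (dr dc : Int) =>
          pvStepsA_eq m bs w hw (pvExploreA m bs fuel') dr dc bi iv _ _ _ hInv' Hrec
        cases iv with
        | false =>
          simp only [Bool.false_eq_true, reduceIte]
          have h1 := hs 0 1 (bs - bi).toNat 0 row col s q
          simp only [mul_zero, add_zero] at h1
          rw [pvDirsA, pvDirsA, pvDirsA, h1]
          have h2 := hs 0 (-1) (bs - bi).toNat 0 row col
            (s ++ (pvResList m w bs (pvSF m w bs 0 1 bi false (t ++ [pvCellB m row col])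
              (c ++ [(col + 1, row + 1)]) row col 0 (bs - bi).toNat)).1)
            (q ++ (pvResList m w bs (pvSF m w bs 0 1 bi false (t ++ [pvCellB m row col])
              (c ++ [(col + 1, row + 1)]) row col 0 (bs - bi).toNat)).2)
          simp only [mul_zero, add_zero] at h2
          rw [h2]
          simp only [pvDiscard_append v (row, col) hnv, List.dropLast_concat]
          rw [pvResList_append]
          simp [pvCombine, List.append_assoc]
        | true =>
          simp only [if_true]
          have h1 := hs 1 0 (bs - bi).toNat 0 row col s q
          simp only [mul_zero, add_zero] at h1
          rw [pvDirsA, pvDirsA, pvDirsA, h1]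
          have h2 := hs (-1) 0 (bs - bi).toNat 0 row col
            (s ++ (pvResList m w bs (pvSF m w bs 1 0 bi true (t ++ [pvCellB m row col])
              (c ++ [(col + 1, row + 1)]) row col 0 (bs - bi).toNat)).1)
            (q ++ (pvResList m w bs (pvSF m w bs 1 0 bi true (t ++ [pvCellB m row col])
              (c ++ [(col + 1, row + 1)]) row col 0 (bs - bi).toNat)).2)
          simp only [mul_zero, add_zero] at h2
          rw [h2]
          simp only [pvDiscard_append v (row, col) hnv, List.dropLast_concat]
          rw [pvResList_append]
          simp [pvCombine, List.append_assoc]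

theorem pvFoldCols (m : List (List String)) (bs w : Int)
    (hw : w = ((m.headD []).length : Int)) :
    ∀ (l : List Int) (s : List (List String)) (q : List (List (Int × Int))),
      l.foldl (fun st ci => pvExploreA m bs (bs.toNat + 1) 0 ci 0 true st)
          (([] : PySem.Set (Int × Int)), ([] : List String), ([] : List (Int × Int)), s, q) =
        ([], [], [],
         s ++ (pvResList m w bs (l.map (fun ci =>
           ((0 : Int), ci, (0 : Int), true, [pvCellB m 0 ci], [(ci + 1, (1 : Int))])))).1,
         q ++ (pvResList m w bs (l.map (fun ci =>
           ((0 : Int), ci, (0 : Int), true, [pvCellB m 0 ci], [(ci + 1, (1 : Int))])))).2) := by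
  intro l
  induction l with
  | nil => intro s q; simp [pvResList_nil]
  | cons ci l ih =>
    intro s q
    rw [List.foldl_cons]
    have he := pvExploreA_eq m bs w hw bs.toNat (bs.toNat + 1) 0 ci 0 true [] [] [] s q
      (by omega) (by omega) (by intro p; simp) (by simp)
    simp only [List.nil_append, zero_add] at he
    rw [he, ih]
    simp only [List.map_cons, pvResList_cons, pvCombine, List.append_assoc]

theorem all_sequences_spec : Claim_equal_all_sequences := by
  unfold Claim_equal_all_sequences Spec_all_sequences
  intro matrix bs _ _
  unfold all_sequences all_sequences_alt
  simp only [PySem.Set.ofList_nil]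
  rw [pvFoldCols matrix bs ((matrix.headD []).length : Int) rfl]
  rw [pvRunB_eq matrix ((matrix.headD []).length : Int) bs
    (pvMeasureB bs ((PySem.List.pyRange 0 ((matrix.headD []).length : Int) 1).map
      (fun ci => ((0 : Int), ci, (0 : Int), true, [pvCellB matrix 0 ci], [(ci + 1, (1 : Int))]))))
    _ (le_refl _)]
  simp [pvCombine]
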